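-- pv_equiv track=rewrite | github.com/Red-Stalker/backend_funding_search | integrity.py | _find_gaps_in_buckets
-- ===== SOURCE A (Python) =====
-- BUCKET_MS = 7_200_000             # 2-hour buckets
--
-- def _find_gaps_in_buckets(
--     bucket_counts: dict[int, int],
--     first_bucket: int,
--     last_bucket: int,
-- ) -> list[tuple[int, int]]:
--     """Find contiguous ranges of missing buckets.
--     Returns [(start_ms, end_ms), ...] for each gap.
--     """
--     gaps = []
--     gap_start = None
--
--     for b in range(first_bucket, last_bucket + 1):
--         if b not in bucket_counts:
--             if gap_start is None:
--                 gap_start = b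
--         else:
--             if gap_start is not None:
--                 gaps.append((gap_start * BUCKET_MS, b * BUCKET_MS))
--                 gap_start = None
--
--     if gap_start is not None:
--         gaps.append((gap_start * BUCKET_MS, (last_bucket + 1) * BUCKET_MS))
--
--     return gaps
-- ===== SOURCE B (Python) =====
-- BUCKET_MS = 7_200_000
--
--
-- def _find_gaps_in_buckets(bucket_counts, first_bucket, last_bucket):
--     """Find contiguous ranges of missing buckets by walking the sorted
--     present bucket keys in the span, instead of every bucket index."""
--     gaps = []
--     prev = first_bucket
--     for k in sorted({k for k in bucket_counts
--                      if first_bucket <= k <= last_bucket}):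
--         if prev < k:
--             gaps.append((prev * BUCKET_MS, k * BUCKET_MS))
--         prev = k + 1
--     if prev <= last_bucket:
--         gaps.append((prev * BUCKET_MS, (last_bucket + 1) * BUCKET_MS))
--     return gaps
-- ===== Notes on version B (the rewrite author's own statement) =====
-- stated objective: alternative
-- what changed: Instead of testing every bucket index in the span [first_bucket, last_bucket] for dict membership, B sorts the present bucket keys that fall in the span and emits the gaps between consecutive present keys and the span boundaries; it trades a scan of the whole span for work proportional to the number of present keys.
import Mathlib
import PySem

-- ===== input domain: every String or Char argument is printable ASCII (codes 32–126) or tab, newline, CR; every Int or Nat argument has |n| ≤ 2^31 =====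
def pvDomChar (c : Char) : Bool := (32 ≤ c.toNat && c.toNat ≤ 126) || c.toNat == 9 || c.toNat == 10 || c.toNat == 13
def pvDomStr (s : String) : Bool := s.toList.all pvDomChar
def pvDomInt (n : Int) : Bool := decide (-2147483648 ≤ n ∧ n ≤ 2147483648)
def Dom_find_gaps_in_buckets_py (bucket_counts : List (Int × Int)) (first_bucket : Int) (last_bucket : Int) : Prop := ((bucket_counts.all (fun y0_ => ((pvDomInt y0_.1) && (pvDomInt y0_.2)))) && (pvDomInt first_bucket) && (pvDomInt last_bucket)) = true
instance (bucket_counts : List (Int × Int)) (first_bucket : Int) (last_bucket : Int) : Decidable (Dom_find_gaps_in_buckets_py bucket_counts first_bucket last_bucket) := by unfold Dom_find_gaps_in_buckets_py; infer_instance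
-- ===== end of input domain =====

-- B replaces A's scan of every bucket index in the span by a walk over the
-- sorted present keys inside the span; equal return value proved below.

-- ===== PORT A =====
def find_gaps_in_buckets_py (bucket_counts : List (Int × Int)) (first_bucket : Int) (last_bucket : Int) : List (Int × Int) :=
  -- gaps = [], gap_start = None; for b in range(first, last+1): …
  let st := (PySem.List.pyRange first_bucket (last_bucket + 1) 1).foldl
    (fun (st : List (Int × Int) × Option Int) b =>
      if (bucket_counts.map Prod.fst).contains b = false then
        match st.2 with
        | none => (st.1, some b)
        | some _ => st
      else
        match st.2 with
        | some g => (st.1 ++ [(g * 7200000, b * 7200000)], none)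
        | none => st)
    ([], none)
  match st.2 with
  | some g => st.1 ++ [(g * 7200000, (last_bucket + 1) * 7200000)]
  | none => st.1

-- ===== PORT B =====
def find_gaps_in_buckets_py_alt (bucket_counts : List (Int × Int)) (first_bucket : Int) (last_bucket : Int) : List (Int × Int) :=
  -- for k in sorted({k for k in bucket_counts if first <= k <= last}): …
  let ks := PySem.List.sorted
    (PySem.Set.ofList ((bucket_counts.map Prod.fst).filter
      (fun k => decide (first_bucket ≤ k) && decide (k ≤ last_bucket))))
    (fun x => x) false
  let st := ks.foldl
    (fun (st : List (Int × Int) × Int) k =>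
      ((if st.2 < k then st.1 ++ [(st.2 * 7200000, k * 7200000)] else st.1), k + 1))
    ([], first_bucket)
  if st.2 ≤ last_bucket then st.1 ++ [(st.2 * 7200000, (last_bucket + 1) * 7200000)] else st.1

-- ===== PRECONDITION & SPEC =====
def Spec_find_gaps_in_buckets_py (bucket_counts : List (Int × Int)) (first_bucket : Int) (last_bucket : Int) (out : List (Int × Int)) : Prop := out = find_gaps_in_buckets_py_alt bucket_counts first_bucket last_bucket
instance (bucket_counts : List (Int × Int)) (first_bucket : Int) (last_bucket : Int) (out : List (Int × Int)) : Decidable (Spec_find_gaps_in_buckets_py bucket_counts first_bucket last_bucket out) := by unfold Spec_find_gaps_in_buckets_py; infer_instance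

-- ===== CLAIM (what is proved, stated in full; the proofs are below) =====
def Claim_equal_find_gaps_in_buckets_py : Prop := ∀ (bucket_counts : List (Int × Int)) (first_bucket : Int) (last_bucket : Int), Dom_find_gaps_in_buckets_py bucket_counts first_bucket last_bucket → Spec_find_gaps_in_buckets_py bucket_counts first_bucket last_bucket (find_gaps_in_buckets_py bucket_counts first_bucket last_bucket)

-- ===== LEMMAS AND PROOFS =====

/-- A's loop step. -/
def aStep (keys : List Int) (st : List (Int × Int) × Option Int) (b : Int) : List (Int × Int) × Option Int :=
  if keys.contains b = false then
    match st.2 with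
    | none => (st.1, some b)
    | some _ => st
  else
    match st.2 with
    | some g => (st.1 ++ [(g * 7200000, b * 7200000)], none)
    | none => st

/-- A's result, given the loop range and the initial gap_start. -/
def aFin (keys : List Int) (first last : Int) (gs : Option Int) : List (Int × Int) :=
  let st := (PySem.List.pyRange first (last + 1) 1).foldl (aStep keys) ([], gs)
  match st.2 with
  | some g => st.1 ++ [(g * 7200000, (last + 1) * 7200000)]
  | none => st.1

/-- B's loop step. -/
def bStep (st : List (Int × Int) × Int) (k : Int) : List (Int × Int) × Int :=
  ((if st.2 < k then st.1 ++ [(st.2 * 7200000, k * 7200000)] else st.1), k + 1)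

/-- B's result, given the key list and initial prev. -/
def bFin (last : Int) (prev : Int) (ks : List Int) : List (Int × Int) :=
  let st := ks.foldl bStep ([], prev)
  if st.2 ≤ last then st.1 ++ [(st.2 * 7200000, (last + 1) * 7200000)] else st.1

lemma aStep_acc (keys : List Int) (acc d : List (Int × Int)) (gs : Option Int) (b : Int) :
    aStep keys (acc ++ d, gs) b = (acc ++ (aStep keys (d, gs) b).1, (aStep keys (d, gs) b).2) := by
  unfold aStep; cases gs <;> split <;> simp

lemma aFold_acc (keys : List Int) (l : List Int) (acc : List (Int × Int)) (gs : Option Int) :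
    l.foldl (aStep keys) (acc, gs)
      = (acc ++ (l.foldl (aStep keys) ([], gs)).1, (l.foldl (aStep keys) ([], gs)).2) := by
  induction l generalizing acc gs with
  | nil => simp
  | cons b t ih =>
    simp only [List.foldl_cons]
    have h1 : aStep keys (acc, gs) b
        = (acc ++ (aStep keys ([], gs) b).1, (aStep keys ([], gs) b).2) := by
      simpa using aStep_acc keys acc [] gs b
    rw [h1]
    rcases h2 : aStep keys ([], gs) b with ⟨d, gs'⟩
    rw [ih (acc ++ d) gs', ih d gs', List.append_assoc]

lemma bStep_acc (acc d : List (Int × Int)) (p k : Int) :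
    bStep (acc ++ d, p) k = (acc ++ (bStep (d, p) k).1, (bStep (d, p) k).2) := by
  unfold bStep; split <;> simp

lemma bFold_acc (l : List Int) (acc : List (Int × Int)) (p : Int) :
    l.foldl bStep (acc, p)
      = (acc ++ (l.foldl bStep ([], p)).1, (l.foldl bStep ([], p)).2) := by
  induction l generalizing acc p with
  | nil => simp
  | cons k t ih =>
    simp only [List.foldl_cons]
    have h1 : bStep (acc, p) k = (acc ++ (bStep ([], p) k).1, (bStep ([], p) k).2) := by
      simpa using bStep_acc acc [] p k
    rw [h1]
    rcases h2 : bStep ([], p) k with ⟨d, p'⟩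
    rw [ih (acc ++ d) p', ih d p', List.append_assoc]

lemma aFin_cons (keys : List Int) (first last : Int) (h : first ≤ last) (gs : Option Int) :
    aFin keys first last gs
      = (aStep keys ([], gs) first).1 ++ aFin keys (first + 1) last (aStep keys ([], gs) first).2 := by
  unfold aFin
  rw [PySem.List.pyRange_one_cons (by omega)]
  simp only [List.foldl_cons]
  rcases h2 : aStep keys ([], gs) first with ⟨d, gs'⟩
  rw [aFold_acc keys _ d gs']
  cases h3 : ((PySem.List.pyRange (first + 1) (last + 1) 1).foldl (aStep keys) ([], gs')).2 <;> simp

lemma bFin_cons (last p k : Int) (ks : List Int) :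
    bFin last p (k :: ks)
      = (bStep ([], p) k).1 ++ bFin last (k + 1) ks := by
  unfold bFin
  simp only [List.foldl_cons]
  have : bStep ([], p) k = ((bStep ([], p) k).1, k + 1) := by unfold bStep; split <;> simp
  rw [this, bFold_acc ks _ (k + 1)]
  by_cases h3 : (ks.foldl bStep ([], k + 1)).2 ≤ last <;> simp [h3]

/-- The strictly increasing list of present keys in [first, last]. -/
def rkeys (keys : List Int) (first last : Int) : List Int :=
  if h : last < first then []
  else if keys.contains first then first :: rkeys keys (first + 1) last
  else rkeys keys (first + 1) last
termination_by (last + 1 - first).toNat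
decreasing_by all_goals (simp at h; omega)

lemma mem_rkeys (keys : List Int) (last : Int) : ∀ n (first x : Int),
    n = (last + 1 - first).toNat →
    (x ∈ rkeys keys first last ↔ x ∈ keys ∧ first ≤ x ∧ x ≤ last) := by
  intro n
  induction n with
  | zero =>
    intro first x hn
    rw [rkeys, dif_pos (show last < first by omega)]
    simp
    omega
  | succ m ih =>
    intro first x hn
    rw [rkeys, dif_neg (show ¬ last < first by omega)]
    have ihx := ih (first + 1) x (by omega)
    by_cases hc : keys.contains first
    · rw [if_pos hc]
      have hmem : first ∈ keys := by simpa using hc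
      simp only [List.mem_cons, ihx]
      constructor
      · rintro (rfl | ⟨a, b, c⟩)
        · exact ⟨hmem, by omega, by omega⟩
        · exact ⟨a, by omega, c⟩
      · rintro ⟨a, b, c⟩
        by_cases hx : x = first
        · exact Or.inl hx
        · exact Or.inr ⟨a, by omega, c⟩
    · simp only [Bool.not_eq_true] at hc
      rw [if_neg (by rw [hc]; simp)]
      have hnm : first ∉ keys := by simpa using hc
      rw [ihx]
      constructor
      · rintro ⟨a, b, c⟩; exact ⟨a, by omega, c⟩
      · rintro ⟨a, b, c⟩
        refine ⟨a, ?_, c⟩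
        rcases eq_or_lt_of_le b with rfl | hlt
        · exact absurd a hnm
        · omega

lemma pairwise_rkeys (keys : List Int) (last : Int) : ∀ n (first : Int),
    n = (last + 1 - first).toNat →
    (rkeys keys first last).Pairwise (· < ·) := by
  intro n
  induction n with
  | zero =>
    intro first hn
    rw [rkeys, dif_pos (show last < first by omega)]
    simp
  | succ m ih =>
    intro first hn
    rw [rkeys, dif_neg (show ¬ last < first by omega)]
    by_cases hc : keys.contains first
    · rw [if_pos hc]
      refine List.Pairwise.cons ?_ (ih (first + 1) (by omega))
      intro y hy
      have := (mem_rkeys keys last ((last + 1 - (first + 1)).toNat) (first + 1) y rfl).mp hy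
      omega
    · rw [if_neg hc]
      exact ih (first + 1) (by omega)

lemma rkeys_eq_sorted (keys : List Int) (first last : Int) :
    PySem.List.sorted
      (PySem.Set.ofList (keys.filter (fun k => decide (first ≤ k) && decide (k ≤ last))))
      (fun x => x) false = rkeys keys first last := by
  have hpw := pairwise_rkeys keys last ((last + 1 - first).toNat) first rfl
  apply PySem.List.sorted_eq_of_perm_of_pairwise_lt
  · rw [List.perm_ext_iff_of_nodup hpw.nodup (PySem.Set.nodup_ofList _)]
    intro x
    rw [mem_rkeys keys last ((last + 1 - first).toNat) first x rfl,
      PySem.Set.mem_ofList, List.mem_filter]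
    simp
  · exact hpw

/-- Main invariant: A's scan with pending gap_start gs equals B's walk over the
present keys, starting from prev = gs.getD first. -/
lemma main_inv (keys : List Int) (last : Int) : ∀ n (first : Int) (gs : Option Int),
    n = (last + 1 - first).toNat →
    (∀ g, gs = some g → g < first ∧ g ≤ last) →
    aFin keys first last gs = bFin last (gs.getD first) (rkeys keys first last) := by
  intro n
  induction n with
  | zero =>
    intro first gs hn hg
    have hfl : last < first := by omega
    rw [rkeys, dif_pos hfl]
    unfold aFin
    rw [PySem.List.pyRange_one_eq_nil (by omega)]
    cases gs with
    | none => simp [bFin, bStep]; omega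
    | some g =>
      have := hg g rfl
      simp [bFin, bStep]
      omega
  | succ m ih =>
    intro first gs hn hg
    have hfl : first ≤ last := by omega
    rw [aFin_cons keys first last hfl gs]
    rw [rkeys, dif_neg (show ¬ last < first by omega)]
    by_cases hc : keys.contains first
    · rw [if_pos hc]
      cases gs with
      | none =>
        have hstep : aStep keys ([], none) first = ([], none) := by unfold aStep; rw [hc]; simp
        rw [hstep]
        simp only [Option.getD_none]
        have hb : bFin last first (first :: rkeys keys (first + 1) last)
            = bFin last (first + 1) (rkeys keys (first + 1) last) := by
          rw [bFin_cons]; simp [bStep]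
        rw [hb]
        simpa using ih (first + 1) none (by omega) (by simp)
      | some g =>
        obtain ⟨hg1, hg2⟩ := hg g rfl
        have hstep : aStep keys ([], some g) first = ([(g * 7200000, first * 7200000)], none) := by
          unfold aStep; rw [hc]; simp
        rw [hstep]
        simp only [Option.getD_some]
        have hb : bFin last g (first :: rkeys keys (first + 1) last)
            = [(g * 7200000, first * 7200000)] ++ bFin last (first + 1) (rkeys keys (first + 1) last) := by
          rw [bFin_cons]; simp [bStep, hg1]
        rw [hb]
        simpa using congrArg ([(g * 7200000, first * 7200000)] ++ ·)
          (by simpa using ih (first + 1) none (by omega) (by simp))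
    · simp only [Bool.not_eq_true] at hc
      rw [if_neg (by rw [hc]; simp)]
      cases gs with
      | none =>
        have hstep : aStep keys ([], none) first = ([], some first) := by unfold aStep; rw [hc]; simp
        rw [hstep]
        simp only [Option.getD_none]
        simpa using ih (first + 1) (some first) (by omega)
          (by intro g h; cases h; omega)
      | some g =>
        obtain ⟨hg1, hg2⟩ := hg g rfl
        have hstep : aStep keys ([], some g) first = ([], some g) := by unfold aStep; rw [hc]; simp
        rw [hstep]
        simp only [Option.getD_some]
        simpa using ih (first + 1) (some g) (by omega)
          (by intro g' h; cases h; omega)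

lemma portA_eq_aFin (bc : List (Int × Int)) (first last : Int) :
    find_gaps_in_buckets_py bc first last = aFin (bc.map Prod.fst) first last none := rfl

lemma portB_eq_bFin (bc : List (Int × Int)) (first last : Int) :
    find_gaps_in_buckets_py_alt bc first last
      = bFin last first (rkeys (bc.map Prod.fst) first last) := by
  unfold find_gaps_in_buckets_py_alt bFin bStep
  rw [rkeys_eq_sorted]

-- ===== VERDICT (by name: the statement is the Claim_ definition above) =====
theorem find_gaps_in_buckets_py_spec : Claim_equal_find_gaps_in_buckets_py := by
  intro bc first last _
  unfold Spec_find_gaps_in_buckets_py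
  rw [portA_eq_aFin, portB_eq_bFin]
  exact main_inv (bc.map Prod.fst) last ((last + 1 - first).toNat) first none rfl (by simp)
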